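-- pv_equiv track=rewrite | github.com/sunnweiwei/ZeroGR | genir.py | last_id
-- ===== SOURCE A (Python) =====
-- def last_id(lst, target):
--     if target is None:
--         return 0
--     if isinstance(target, int):
--         target = [target]
--     target_len = len(target)
--     for i in range(len(lst) - target_len, -1, -1):
--         if lst[i : i + target_len] == target:
--             return i + target_len
--     return -1
-- ===== SOURCE B (Python) =====
-- def last_id(lst, target):
--     if target is None:
--         return 0
--     if isinstance(target, int):
--         target = [target]
--     m = len(target)
--     best = -1
--     for i in range(len(lst) - m + 1):
--         if all(lst[i + j] == target[j] for j in range(m)):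
--             best = i + m
--     return best
-- ===== Notes on version B (the rewrite author's own statement) =====
-- stated objective: alternative
-- what changed: A scans backwards from the end taking a fresh slice at each position and returning on the first match; B scans forward once with an element-wise prefix check (no slicing) and keeps the end index of the last match seen.
import Mathlib
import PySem

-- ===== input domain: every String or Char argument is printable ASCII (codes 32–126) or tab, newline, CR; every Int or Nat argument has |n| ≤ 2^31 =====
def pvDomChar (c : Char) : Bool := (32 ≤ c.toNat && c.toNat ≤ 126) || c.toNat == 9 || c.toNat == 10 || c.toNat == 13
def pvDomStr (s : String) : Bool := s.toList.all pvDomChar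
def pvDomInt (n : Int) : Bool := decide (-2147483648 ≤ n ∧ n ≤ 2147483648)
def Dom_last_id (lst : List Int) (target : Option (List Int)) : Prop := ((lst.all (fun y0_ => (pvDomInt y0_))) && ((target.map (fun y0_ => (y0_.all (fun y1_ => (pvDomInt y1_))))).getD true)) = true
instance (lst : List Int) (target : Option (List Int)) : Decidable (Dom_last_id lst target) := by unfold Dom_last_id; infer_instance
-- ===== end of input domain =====

-- B replaces A's backwards slice-and-compare scan (first match from the right) by a single
-- forward pass with an element-wise prefix check that keeps the last match's end index.

-- ===== PORT A =====
-- the backwards 'for i in range(len(lst)-target_len, -1, -1)' loop with its early return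
def lastIdScanA (lst t : List Int) : List Int → Int
  | [] => -1
  | i :: rest =>
      if PySem.List.slice lst (some i) (some (i + (t.length : Int))) = t
      then i + (t.length : Int)
      else lastIdScanA lst t rest

def last_id (lst : List Int) (target : Option (List Int)) : Int :=
  match target with
  | none => 0
  | some t =>
      lastIdScanA lst t (PySem.List.pyRange ((lst.length : Int) - (t.length : Int)) (-1) (-1))

-- ===== PORT B =====
-- all(lst[i + j] == target[j] for j in range(m)); indices are always in range at call sites
def matchAtB (lst t : List Int) (i : Int) : Bool :=
  (PySem.List.pyRange 0 (t.length : Int) 1).all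
    (fun j => PySem.List.pyGet? lst (i + j) == PySem.List.pyGet? t j)

def last_id_alt (lst : List Int) (target : Option (List Int)) : Int :=
  match target with
  | none => 0
  | some t =>
      (PySem.List.pyRange 0 ((lst.length : Int) - (t.length : Int) + 1) 1).foldl
        (fun best i => if matchAtB lst t i then i + (t.length : Int) else best) (-1)

-- ===== PRECONDITION & SPEC =====
def Spec_last_id (lst : List Int) (target : Option (List Int)) (out : Int) : Prop := out = last_id_alt lst target
instance (lst : List Int) (target : Option (List Int)) (out : Int) : Decidable (Spec_last_id lst target out) := by unfold Spec_last_id; infer_instance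

-- ===== CLAIM (what is proved, stated in full; the proofs are below) =====
def Claim_equal_last_id : Prop := ∀ (lst : List Int) (target : Option (List Int)), Dom_last_id lst target → Spec_last_id lst target (last_id lst target)

-- ===== LEMMAS AND PROOFS =====

-- 'first hit scanning left to right, default d' — the shape shared by both loops
def firstHitD (p : Int → Bool) (v : Int → Int) (d : Int) : List Int → Int
  | [] => d
  | i :: rest => if p i then v i else firstHitD p v d rest

lemma lastIdScanA_eq_firstHitD (lst t : List Int) (L : List Int) :
    lastIdScanA lst t L =
      firstHitD (fun i => decide (PySem.List.slice lst (some i) (some (i + (t.length : Int))) = t))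
        (fun i => i + (t.length : Int)) (-1) L := by
  induction L with
  | nil => rfl
  | cons x xs ih => simp [lastIdScanA, firstHitD, ih]

lemma firstHitD_append_singleton (p : Int → Bool) (v : Int → Int) (d x : Int) (M : List Int) :
    firstHitD p v d (M ++ [x]) = firstHitD p v (if p x then v x else d) M := by
  induction M with
  | nil => rfl
  | cons y ys ih => by_cases h : p y <;> simp [firstHitD, h, ih]

lemma foldl_eq_firstHitD_reverse (p : Int → Bool) (v : Int → Int) (L : List Int) (d : Int) :
    L.foldl (fun best i => if p i then v i else best) d = firstHitD p v d L.reverse := by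
  induction L generalizing d with
  | nil => rfl
  | cons x xs ih =>
      simp only [List.foldl_cons, List.reverse_cons, firstHitD_append_singleton]
      exact ih _

lemma firstHitD_congr (p q : Int → Bool) (v : Int → Int) (d : Int) (L : List Int)
    (h : ∀ i ∈ L, p i = q i) : firstHitD p v d L = firstHitD q v d L := by
  induction L with
  | nil => rfl
  | cons x xs ih =>
      simp only [firstHitD, h x (by simp)]
      rw [ih (fun i hi => h i (by simp [hi]))]

-- slice-equality at a nonnegative position equals B's element-wise check
lemma slice_eq_iff_matchAtB (lst t : List Int) (k : Nat) :
    decide (PySem.List.slice lst (some (k : Int)) (some ((k : Int) + (t.length : Int))) = t)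
      = matchAtB lst t (k : Int) := by
  rw [PySem.List.slice_natCast_add]
  unfold matchAtB
  rw [PySem.List.pyRange_one]
  rw [Bool.eq_iff_iff]
  simp only [List.all_map, List.all_eq_true, List.mem_range, Function.comp,
    decide_eq_true_eq, Int.sub_zero, Int.toNat_natCast, zero_add]
  constructor
  · intro h j hj
    have h2 : ((k : Int) + (j : Int)) = ((k + j : Nat) : Int) := by push_cast; ring
    rw [h2, PySem.List.pyGet?_natCast, PySem.List.pyGet?_natCast, beq_iff_eq]
    have := congrArg (fun l => l[j]?) h
    simpa [List.getElem?_take, hj, List.getElem?_drop] using this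
  · intro h
    apply List.ext_getElem?
    intro j
    by_cases hj : j < t.length
    · have := h j hj
      have h2 : ((k : Int) + (j : Int)) = ((k + j : Nat) : Int) := by push_cast; ring
      rw [h2, PySem.List.pyGet?_natCast, PySem.List.pyGet?_natCast, beq_iff_eq] at this
      simpa [List.getElem?_take, hj, List.getElem?_drop] using this
    · simp [hj]

-- ===== VERDICT (by name: the statement is the Claim_ definition above) =====
theorem last_id_spec : Claim_equal_last_id := by
  intro lst target _
  unfold Spec_last_id
  match target with
  | none => rfl
  | some t =>
      simp only [last_id, last_id_alt]
      rw [foldl_eq_firstHitD_reverse, lastIdScanA_eq_firstHitD]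
      rw [show PySem.List.pyRange ((lst.length : Int) - (t.length : Int)) (-1) (-1)
            = (PySem.List.pyRange 0 ((lst.length : Int) - (t.length : Int) + 1) 1).reverse from by
        rw [PySem.List.pyRange_neg_one_eq_reverse]; norm_num]
      apply firstHitD_congr
      intro i hi
      rw [List.mem_reverse, PySem.List.mem_pyRange_one] at hi
      rcases Int.eq_ofNat_of_zero_le hi.1 with ⟨k, rfl⟩
      exact slice_eq_iff_matchAtB lst t k
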